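-- pv_equiv track=rewrite | github.com/antons1/health-cli | src/health_data/formatter.py | format_zones
-- ===== SOURCE A (Python) =====
-- def format_zones(zones):
--     """Format heart rate and power zones."""
--     if not zones:
--         return "No zone data available."
--
--     lines = []
--     hr = zones.get("heart_rate", {})
--     if hr and hr.get("zones"):
--         lines.append("Heart Rate Zones")
--         for i, z in enumerate(hr["zones"], 1):
--             max_val = z.get("max", -1)
--             max_str = str(max_val) if max_val > 0 else "∞"
--             lines.append(f"  Z{i}  {z.get('min', 0)}–{max_str} bpm")
--
--     power = zones.get("power", {})
--     if power and power.get("zones"):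
--         if lines:
--             lines.append("")
--         lines.append("Power Zones")
--         for i, z in enumerate(power["zones"], 1):
--             max_val = z.get("max", -1)
--             max_str = str(max_val) if max_val > 0 else "∞"
--             lines.append(f"  Z{i}  {z.get('min', 0)}–{max_str} W")
--
--     if not lines:
--         return "No zone data available."
--     return "\n".join(lines)
-- ===== SOURCE B (Python) =====
-- def _zone_block(zs, i, unit):
--     """Recursively format zs (non-empty tail handling) starting at zone index i."""
--     z = zs[0]
--     max_val = z.get("max", -1)
--     line = f"  Z{i}  {z.get('min', 0)}–{str(max_val) if max_val > 0 else '∞'} {unit}"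
--     if len(zs) == 1:
--         return line
--     return line + "\n" + _zone_block(zs[1:], i + 1, unit)
--
--
-- def format_zones(zones):
--     """Format heart rate and power zones."""
--     out = ""
--     if zones:
--         # build the result back-to-front: power section first, then prepend heart rate
--         for key, title, unit in (("power", "Power Zones", "W"),
--                                  ("heart_rate", "Heart Rate Zones", "bpm")):
--             sec = zones.get(key, {})
--             if sec and sec.get("zones"):
--                 block = title + "\n" + _zone_block(sec["zones"], 1, unit)
--                 out = block + ("\n\n" + out if out else "")
--     return out or "No zone data available."
-- ===== Notes on version B (the rewrite author's own statement) =====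
-- stated objective: alternative
-- what changed: Builds the result string back-to-front by direct concatenation: a recursive zone-block formatter plus a table-driven loop over (power, heart_rate) that prepends each finished section, instead of A's forward list-of-lines accumulation with a stateful blank-line append and a final join.
import Mathlib
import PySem

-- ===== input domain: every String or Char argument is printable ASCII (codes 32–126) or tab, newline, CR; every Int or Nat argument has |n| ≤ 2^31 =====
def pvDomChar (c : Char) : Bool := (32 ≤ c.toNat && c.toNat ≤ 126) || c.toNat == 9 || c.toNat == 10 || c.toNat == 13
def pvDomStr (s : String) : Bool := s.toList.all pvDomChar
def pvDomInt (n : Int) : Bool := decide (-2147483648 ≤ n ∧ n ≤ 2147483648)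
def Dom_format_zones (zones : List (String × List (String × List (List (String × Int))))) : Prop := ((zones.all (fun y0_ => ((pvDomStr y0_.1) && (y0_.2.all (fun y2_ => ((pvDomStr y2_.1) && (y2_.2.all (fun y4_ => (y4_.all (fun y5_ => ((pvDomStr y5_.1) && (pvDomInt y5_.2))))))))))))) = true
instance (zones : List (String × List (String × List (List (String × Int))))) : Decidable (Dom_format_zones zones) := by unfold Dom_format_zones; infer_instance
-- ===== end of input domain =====

-- B builds the result string back-to-front by direct concatenation (recursive zone-block
-- formatter + table-driven section loop that PREPENDS each section), instead of A's forward
-- list-of-lines accumulation with a stateful blank-line append and a final join: an alternative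
-- decomposition, same cost.

-- ===== PORT A =====
-- A's per-zone f-string line (the body of each of A's loop iterations)
def pvAZoneLine (i : Int) (z : List (String × Int)) (unit : String) : String :=
  let max_val := (PySem.Dict.mk z).getD "max" (-1)
  let max_str := if max_val > 0 then PySem.Int.toStr max_val else "∞"
  "  Z" ++ PySem.Int.toStr i ++ "  " ++ PySem.Int.toStr ((PySem.Dict.mk z).getD "min" 0) ++ "–" ++ max_str ++ " " ++ unit

def format_zones (zones : List (String × List (String × List (List (String × Int))))) : String :=
  if zones = [] then "No zone data available." else
  let lines : List String := []
  let hr := (PySem.Dict.mk zones).getD "heart_rate" []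
  let lines :=
    if hr ≠ [] ∧ (PySem.Dict.mk hr).getD "zones" [] ≠ [] then
      (PySem.List.enumerate ((PySem.Dict.mk hr).getD "zones" []) 1).foldl
        (fun acc p => acc ++ [pvAZoneLine p.1 p.2 "bpm"]) (lines ++ ["Heart Rate Zones"])
    else lines
  let power := (PySem.Dict.mk zones).getD "power" []
  let lines :=
    if power ≠ [] ∧ (PySem.Dict.mk power).getD "zones" [] ≠ [] then
      (PySem.List.enumerate ((PySem.Dict.mk power).getD "zones" []) 1).foldl
        (fun acc p => acc ++ [pvAZoneLine p.1 p.2 "W"])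
        ((if lines ≠ [] then lines ++ [""] else lines) ++ ["Power Zones"])
    else lines
  if lines = [] then "No zone data available." else PySem.Str.join "\n" lines

-- ===== PORT B =====
-- Source B's _zone_block: recursive, builds the section body line by line
def pvBBlock : List (List (String × Int)) → Int → String → String
  | [], _, _ => ""   -- _zone_block is only ever called on non-empty lists
  | [z], i, unit =>
    let max_val := (PySem.Dict.mk z).getD "max" (-1)
    "  Z" ++ PySem.Int.toStr i ++ "  " ++ PySem.Int.toStr ((PySem.Dict.mk z).getD "min" 0) ++ "–"
      ++ (if max_val > 0 then PySem.Int.toStr max_val else "∞") ++ " " ++ unit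
  | z :: z' :: rest, i, unit =>
    let max_val := (PySem.Dict.mk z).getD "max" (-1)
    ("  Z" ++ PySem.Int.toStr i ++ "  " ++ PySem.Int.toStr ((PySem.Dict.mk z).getD "min" 0) ++ "–"
      ++ (if max_val > 0 then PySem.Int.toStr max_val else "∞") ++ " " ++ unit)
      ++ "\n" ++ pvBBlock (z' :: rest) (i + 1) unit

-- one iteration of Source B's section loop: prepend the section's block to `out`
def pvBStep (zones : List (String × List (String × List (List (String × Int)))))
    (t : String × String × String) (out : String) : String :=
  let sec := (PySem.Dict.mk zones).getD t.1 []
  if sec ≠ [] ∧ (PySem.Dict.mk sec).getD "zones" [] ≠ [] then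
    (t.2.1 ++ "\n" ++ pvBBlock ((PySem.Dict.mk sec).getD "zones" []) 1 t.2.2)
      ++ (if out ≠ "" then "\n\n" ++ out else "")
  else out

def format_zones_alt (zones : List (String × List (String × List (List (String × Int))))) : String :=
  let out := ""
  let out :=
    if zones ≠ [] then
      ([("power", "Power Zones", "W"), ("heart_rate", "Heart Rate Zones", "bpm")]).foldl
        (fun o t => pvBStep zones t o) out
    else out
  if out = "" then "No zone data available." else out

-- ===== PRECONDITION & SPEC =====
def Spec_format_zones (zones : List (String × List (String × List (List (String × Int))))) (out : String) : Prop := out = format_zones_alt zones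
instance (zones : List (String × List (String × List (List (String × Int))))) (out : String) : Decidable (Spec_format_zones zones out) := by unfold Spec_format_zones; infer_instance

-- ===== CLAIM (what is proved, stated in full; the proofs are below) =====
def Claim_equal_format_zones : Prop := ∀ (zones : List (String × List (String × List (List (String × Int))))), Dom_format_zones zones → Spec_format_zones zones (format_zones zones)

-- ===== LEMMAS AND PROOFS =====

theorem pv_join_sep : ∀ (l1 l2 : List (List Char)), l1 ≠ [] → l2 ≠ [] →
    PySem.Chars.join ['\n'] (l1 ++ [] :: l2)
      = PySem.Chars.join ['\n'] l1 ++ ['\n', '\n'] ++ PySem.Chars.join ['\n'] l2 := by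
  intro l1 l2 h1 h2
  induction l1 with
  | nil => exact absurd rfl h1
  | cons a t ih =>
    cases t with
    | nil =>
      cases l2 with
      | nil => exact absurd rfl h2
      | cons b r =>
        simp [PySem.Chars.join_cons_cons, PySem.Chars.join_singleton]
    | cons c t' =>
      have h := ih (by simp)
      simp only [List.cons_append, PySem.Chars.join_cons_cons] at h ⊢
      rw [h]; simp

-- "\n".join(L1 + [""] + L2) = "\n".join(L1) + "\n\n" + "\n".join(L2)
theorem pv_join_two (L1 L2 : List String) (h1 : L1 ≠ []) (h2 : L2 ≠ []) :
    PySem.Str.join "\n" (L1 ++ "" :: L2)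
      = PySem.Str.join "\n" L1 ++ "\n\n" ++ PySem.Str.join "\n" L2 := by
  apply String.ext
  simp only [PySem.Str.join, String.data_append]
  have h := pv_join_sep (L1.map String.toList) (L2.map String.toList)
    (by simpa using h1) (by simpa using h2)
  simp only [List.map_append, List.map_cons]
  have hnil : ("" : String).toList = ([] : List Char) := by decide
  have hsep : ("\n" : String).toList = ['\n'] := by decide
  simp only [hnil, hsep] at *
  simpa using h

-- "\n".join(t :: L) = t + "\n" + "\n".join(L)  (L nonempty)
theorem pv_join_cons (t : String) (L : List String) (h : L ≠ []) :
    PySem.Str.join "\n" (t :: L) = t ++ "\n" ++ PySem.Str.join "\n" L := by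
  obtain ⟨b, r, rfl⟩ : ∃ b r, L = b :: r := by cases L with
    | nil => exact absurd rfl h
    | cons b r => exact ⟨b, r, rfl⟩
  apply String.ext
  simp only [PySem.Str.join, List.map_cons, String.toList_append, String.toList_ofList]
  have hsep : ("\n" : String).toList = ['\n'] := by decide
  rw [hsep, PySem.Chars.join_cons_cons]

theorem pv_join_one (s : String) : PySem.Str.join "\n" [s] = s := by
  apply String.ext
  simp [PySem.Str.join, PySem.Chars.join_singleton]

-- Source B's recursive block equals "\n".join of A's enumerated lines
theorem pvBBlock_eq : ∀ (zs : List (List (String × Int))) (i : Int) (unit : String), zs ≠ [] →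
    pvBBlock zs i unit
      = PySem.Str.join "\n" ((PySem.List.enumerate zs i).map (fun p => pvAZoneLine p.1 p.2 unit)) := by
  intro zs
  induction zs with
  | nil => intro i unit h; exact absurd rfl h
  | cons z rest ih =>
    intro i unit _
    cases rest with
    | nil =>
      simp [pvBBlock, PySem.List.enumerate_cons, PySem.List.enumerate_nil, pv_join_one, pvAZoneLine]
    | cons z' r =>
      rw [show pvBBlock (z :: z' :: r) i unit
            = pvAZoneLine i z unit ++ "\n" ++ pvBBlock (z' :: r) (i + 1) unit from rfl]
      rw [ih (i + 1) unit (by simp)]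
      rw [PySem.List.enumerate_cons, List.map_cons]
      exact (pv_join_cons _ _ (by simp)).symm

-- (t ++ "\n" ++ b) ++ s is never empty when the title t is not
theorem pv_pre_ne (t b s : String) (h : t.toList ≠ []) : (t ++ "\n" ++ b) ++ s ≠ "" := by
  intro hc
  have := congrArg String.toList hc
  simp only [String.toList_append] at this
  cases h' : t.toList with
  | nil => exact h h'
  | cons c cs =>
    rw [h'] at this
    simp at this

-- the shared core: A's list-of-lines result equals B's back-to-front string
theorem pv_core (hr pw : List (String × List (List (String × Int)))) :
    (let lines : List String := []
     let lines :=
       if hr ≠ [] ∧ (PySem.Dict.mk hr).getD "zones" [] ≠ [] then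
         (PySem.List.enumerate ((PySem.Dict.mk hr).getD "zones" []) 1).foldl
           (fun acc p => acc ++ [pvAZoneLine p.1 p.2 "bpm"]) (lines ++ ["Heart Rate Zones"])
       else lines
     let lines :=
       if pw ≠ [] ∧ (PySem.Dict.mk pw).getD "zones" [] ≠ [] then
         (PySem.List.enumerate ((PySem.Dict.mk pw).getD "zones" []) 1).foldl
           (fun acc p => acc ++ [pvAZoneLine p.1 p.2 "W"])
           ((if lines ≠ [] then lines ++ [""] else lines) ++ ["Power Zones"])
       else lines
     if lines = [] then "No zone data available." else PySem.Str.join "\n" lines)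
    = (let o1 :=
         if pw ≠ [] ∧ (PySem.Dict.mk pw).getD "zones" [] ≠ [] then
           ("Power Zones" ++ "\n" ++ pvBBlock ((PySem.Dict.mk pw).getD "zones" []) 1 "W")
             ++ (if ("" : String) ≠ "" then "\n\n" ++ "" else "")
         else ""
       let o2 :=
         if hr ≠ [] ∧ (PySem.Dict.mk hr).getD "zones" [] ≠ [] then
           ("Heart Rate Zones" ++ "\n" ++ pvBBlock ((PySem.Dict.mk hr).getD "zones" []) 1 "bpm")
             ++ (if o1 ≠ "" then "\n\n" ++ o1 else "")
         else o1
       if o2 = "" then "No zone data available." else o2) := by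
  simp only [PySem.List.foldl_append_singleton_eq_map, List.nil_append]
  set Zh := (PySem.Dict.mk hr).getD "zones" [] with hZh
  set Zp := (PySem.Dict.mk pw).getD "zones" [] with hZp
  set Mh := (PySem.List.enumerate Zh 1).map (fun p => pvAZoneLine p.1 p.2 "bpm") with hMh
  set Mp := (PySem.List.enumerate Zp 1).map (fun p => pvAZoneLine p.1 p.2 "W") with hMp
  by_cases c1 : hr ≠ [] ∧ Zh ≠ []
  · have hSh : ("Heart Rate Zones" ++ "\n" ++ pvBBlock Zh 1 "bpm")
        = PySem.Str.join "\n" ("Heart Rate Zones" :: Mh) := by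
      rw [pvBBlock_eq Zh 1 "bpm" c1.2, pv_join_cons]
      rw [hMh]
      cases h : Zh with
      | nil => exact absurd h c1.2
      | cons a t => simp [PySem.List.enumerate_cons]
    by_cases c2 : pw ≠ [] ∧ Zp ≠ []
    · -- both sections
      have hSp : ("Power Zones" ++ "\n" ++ pvBBlock Zp 1 "W")
          = PySem.Str.join "\n" ("Power Zones" :: Mp) := by
        rw [pvBBlock_eq Zp 1 "W" c2.2, pv_join_cons]
        rw [hMp]
        cases h : Zp with
        | nil => exact absurd h c2.2
        | cons a t => simp [PySem.List.enumerate_cons]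
      simp only [if_pos c1, if_pos c2, if_neg (by simp : ¬("" : String) ≠ "")]
      rw [if_pos (show (["Heart Rate Zones"] ++ Mh : List String) ≠ [] by simp)]
      rw [if_pos (pv_pre_ne "Power Zones" (pvBBlock Zp 1 "W") "" (by decide))]
      rw [if_neg (show ¬(["Heart Rate Zones"] ++ Mh ++ [""] ++ ["Power Zones"] ++ Mp : List String) = [] by simp)]
      rw [if_neg (pv_pre_ne "Heart Rate Zones" (pvBBlock Zh 1 "bpm") _ (by decide))]
      rw [show (["Heart Rate Zones"] ++ Mh ++ [""] ++ ["Power Zones"] ++ Mp : List String)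
            = ("Heart Rate Zones" :: Mh) ++ "" :: ("Power Zones" :: Mp) by simp]
      rw [pv_join_two _ _ (by simp) (by simp), ← hSh, ← hSp]
      simp [String.append_assoc]
    · -- heart rate only
      simp only [if_pos c1, if_neg c2]
      rw [if_neg (show ¬(("" : String) ≠ "") by simp)]
      rw [if_neg (show ¬(["Heart Rate Zones"] ++ Mh : List String) = [] by simp)]
      rw [if_neg (pv_pre_ne "Heart Rate Zones" (pvBBlock Zh 1 "bpm") "" (by decide))]
      rw [show (["Heart Rate Zones"] ++ Mh : List String) = "Heart Rate Zones" :: Mh by simp]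
      rw [← hSh]; simp
  · by_cases c2 : pw ≠ [] ∧ Zp ≠ []
    · -- power only
      have hSp : ("Power Zones" ++ "\n" ++ pvBBlock Zp 1 "W")
          = PySem.Str.join "\n" ("Power Zones" :: Mp) := by
        rw [pvBBlock_eq Zp 1 "W" c2.2, pv_join_cons]
        rw [hMp]
        cases h : Zp with
        | nil => exact absurd h c2.2
        | cons a t => simp [PySem.List.enumerate_cons]
      simp only [if_neg c1, if_pos c2, if_neg (by simp : ¬("" : String) ≠ "")]
      rw [if_neg (show ¬(([] : List String) ≠ []) by simp)]
      rw [if_neg (show ¬(([] : List String) ++ ["Power Zones"] ++ Mp) = [] by simp)]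
      rw [if_neg (pv_pre_ne "Power Zones" (pvBBlock Zp 1 "W") "" (by decide))]
      rw [show (([] : List String) ++ ["Power Zones"] ++ Mp) = "Power Zones" :: Mp by simp]
      rw [← hSp]; simp
    · -- neither
      simp [if_neg c1, if_neg c2]

theorem format_zones_eq (zones : List (String × List (String × List (List (String × Int))))) :
    format_zones zones = format_zones_alt zones := by
  by_cases hz : zones = []
  · simp [format_zones, format_zones_alt, hz]
  · simp only [format_zones, format_zones_alt, if_neg hz, if_pos hz, ne_eq,
      List.foldl_cons, List.foldl_nil]
    have h := pv_core ((PySem.Dict.mk zones).getD "heart_rate" []) ((PySem.Dict.mk zones).getD "power" [])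
    simp only [pvBStep] at *
    convert h using 2

-- ===== VERDICT (by name: the statement is the Claim_ definition above) =====
theorem format_zones_spec : Claim_equal_format_zones := by
  intro zones _
  unfold Spec_format_zones
  exact format_zones_eq zones
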